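-- pv_equiv track=rewrite | github.com/roy-sukrit/stress-detection-system | tasks/tracking.py | analyze_gaze_direction_1
-- ===== SOURCE A (Python) =====
-- def analyze_gaze_direction_1(eyes, roi_gray, face_width):
--     """Analyze the gaze direction based on the eye region and face width."""
--     eye_positions = []
--     for (ex, ey, ew, eh) in eyes:
--         eye_center = (ex + ew // 2, ey + eh // 2)
--         eye_positions.append(eye_center)
--
--     eye_positions = sorted(eye_positions, key=lambda pos: pos[0])
--
--     left_eye_x, _ = eye_positions[0]
--     right_eye_x, _ = eye_positions[1]
--     face_center_x = face_width // 2
--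
--     gaze_direction = "Looking Forward"
--
--     if left_eye_x < face_center_x - 10 and right_eye_x < face_center_x - 10:  # Both eyes on the left
--         gaze_direction = "Looking Left"
--     elif right_eye_x > face_center_x + 10 and left_eye_x > face_center_x + 10:  # Both eyes on the right
--         gaze_direction = "Looking Right"
--
--     return gaze_direction
-- ===== SOURCE B (Python) =====
-- def analyze_gaze_direction_1(eyes, roi_gray, face_width):
--     """Analyze the gaze direction based on the eye region and face width."""
--     # One pass: track the two smallest eye-center x values (no list, no sort).
--     m1 = m2 = None
--     for (ex, ey, ew, eh) in eyes:
--         x = ex + ew // 2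
--         if m1 is None or x < m1:
--             m1, m2 = x, m1
--         elif m2 is None or x < m2:
--             m2 = x
--     if m2 is None:
--         raise IndexError("need at least two eyes")
--     face_center_x = face_width // 2
--     if m1 < face_center_x - 10 and m2 < face_center_x - 10:
--         return "Looking Left"
--     if m2 > face_center_x + 10 and m1 > face_center_x + 10:
--         return "Looking Right"
--     return "Looking Forward"
-- ===== Notes on version B (the rewrite author's own statement) =====
-- stated objective: simpler
-- what changed: Replaces build-list + sort + index[0]/[1] by a single pass over the eyes that tracks the two smallest eye-center x values (the y coordinates, never used, are not computed).
import Mathlib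
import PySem

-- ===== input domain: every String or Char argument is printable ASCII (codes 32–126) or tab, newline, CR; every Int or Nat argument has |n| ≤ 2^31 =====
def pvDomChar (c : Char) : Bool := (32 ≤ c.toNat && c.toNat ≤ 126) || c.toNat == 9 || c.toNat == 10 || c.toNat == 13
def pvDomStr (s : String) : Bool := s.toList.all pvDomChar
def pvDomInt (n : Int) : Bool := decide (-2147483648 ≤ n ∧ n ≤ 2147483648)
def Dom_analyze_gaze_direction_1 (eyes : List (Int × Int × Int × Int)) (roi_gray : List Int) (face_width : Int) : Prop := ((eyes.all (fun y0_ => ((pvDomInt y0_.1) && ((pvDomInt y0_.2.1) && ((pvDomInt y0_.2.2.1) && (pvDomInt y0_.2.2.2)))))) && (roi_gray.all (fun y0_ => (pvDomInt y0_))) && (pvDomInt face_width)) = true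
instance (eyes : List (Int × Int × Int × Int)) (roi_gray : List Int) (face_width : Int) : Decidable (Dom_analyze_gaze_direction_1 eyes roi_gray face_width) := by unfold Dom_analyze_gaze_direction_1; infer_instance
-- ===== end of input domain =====

-- B replaces build-list + sort + index [0]/[1] by a single pass tracking the two
-- smallest eye-center x values (simpler; the unused y coordinates are not computed).


-- ===== PORT A =====
def analyze_gaze_direction_1 (eyes : List (Int × Int × Int × Int)) (roi_gray : List Int) (face_width : Int) : String :=
  let eye_positions : List (Int × Int) :=
    eyes.foldl (fun acc e =>
      acc ++ [(e.1 + PySem.Int.floordiv e.2.2.1 2, e.2.1 + PySem.Int.floordiv e.2.2.2 2)]) []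
  let sortedPos := PySem.List.sorted eye_positions (fun p => p.1)
  match PySem.List.pyGet? sortedPos 0, PySem.List.pyGet? sortedPos 1 with
  | some p0, some p1 =>
    let left_eye_x := p0.1
    let right_eye_x := p1.1
    let face_center_x := PySem.Int.floordiv face_width 2
    let gaze_direction := "Looking Forward"
    if left_eye_x < face_center_x - 10 ∧ right_eye_x < face_center_x - 10 then "Looking Left"
    else if right_eye_x > face_center_x + 10 ∧ left_eye_x > face_center_x + 10 then "Looking Right"
    else gaze_direction
  | _, _ => ""   -- IndexError in Python (fewer than two eyes); excluded by Pre_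

-- ===== PORT B =====
-- step of B's loop: fold the next eye-center x into the (two-smallest-so-far) state
def pvBStep (m : Option Int × Option Int) (x : Int) : Option Int × Option Int :=
  match m with
  | (none, _) => (some x, none)                      -- m1, m2 = x, m1 (m1 was None)
  | (some a, none) => if x < a then (some x, some a) else (some a, some x)
  | (some a, some b) =>
      if x < a then (some x, some a)
      else if x < b then (some a, some x) else (some a, some b)

def analyze_gaze_direction_1_alt (eyes : List (Int × Int × Int × Int)) (roi_gray : List Int) (face_width : Int) : String :=
  let m := eyes.foldl (fun m e => pvBStep m (e.1 + PySem.Int.floordiv e.2.2.1 2)) (none, none)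
  match m.2 with
  | none => ""   -- 'raise IndexError' in Source B (fewer than two eyes); excluded by Pre_
  | some m2 =>
    match m.1 with
    | none => ""   -- unreachable: m2 set implies m1 set
    | some m1 =>
      let face_center_x := PySem.Int.floordiv face_width 2
      if m1 < face_center_x - 10 ∧ m2 < face_center_x - 10 then "Looking Left"
      else if m2 > face_center_x + 10 ∧ m1 > face_center_x + 10 then "Looking Right"
      else "Looking Forward"

-- ===== PRECONDITION & SPEC =====
-- Python A raises IndexError (eye_positions[1]) when fewer than two eyes are given; B raises too.
def Pre_analyze_gaze_direction_1 (eyes : List (Int × Int × Int × Int)) (roi_gray : List Int) (face_width : Int) : Prop := 2 ≤ eyes.length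
instance (eyes : List (Int × Int × Int × Int)) (roi_gray : List Int) (face_width : Int) : Decidable (Pre_analyze_gaze_direction_1 eyes roi_gray face_width) := by unfold Pre_analyze_gaze_direction_1; infer_instance
def pvWitness_analyze_gaze_direction_1 : (List (Int × Int × Int × Int)) × List Int × Int := ([(1, 2, 3, 4), (10, 2, 3, 4)], [5], 40)

def Spec_analyze_gaze_direction_1 (eyes : List (Int × Int × Int × Int)) (roi_gray : List Int) (face_width : Int) (out : String) : Prop := out = analyze_gaze_direction_1_alt eyes roi_gray face_width
instance (eyes : List (Int × Int × Int × Int)) (roi_gray : List Int) (face_width : Int) (out : String) : Decidable (Spec_analyze_gaze_direction_1 eyes roi_gray face_width out) := by unfold Spec_analyze_gaze_direction_1; infer_instance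

-- ===== CLAIM (what is proved, stated in full; the proofs are below) =====
def Claim_equal_analyze_gaze_direction_1 : Prop := ∀ (eyes : List (Int × Int × Int × Int)) (roi_gray : List Int) (face_width : Int), Dom_analyze_gaze_direction_1 eyes roi_gray face_width → Pre_analyze_gaze_direction_1 eyes roi_gray face_width → Spec_analyze_gaze_direction_1 eyes roi_gray face_width (analyze_gaze_direction_1 eyes roi_gray face_width)

-- ===== LEMMAS AND PROOFS =====

-- first two x-coordinates of a list of eye centers
def pvFtf (l : List (Int × Int)) : Option Int × Option Int :=
  match l with
  | [] => (none, none)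
  | [a] => (some a.1, none)
  | a :: b :: _ => (some a.1, some b.1)

theorem pv_insertBy_nil {α : Type} (bef : α → α → Bool) (x : α) :
    PySem.List.insertBy bef x [] = [x] := rfl

theorem pv_insertBy_cons {α : Type} (bef : α → α → Bool) (x y : α) (ys : List α) :
    PySem.List.insertBy bef x (y :: ys) =
      if bef x y then x :: y :: ys else y :: PySem.List.insertBy bef x ys := rfl

theorem pv_ftf_insert (acc : List (Int × Int)) (p : Int × Int) :
    pvFtf (PySem.List.insertBy (fun a b : Int × Int => decide (a.1 < b.1)) p acc) =
      pvBStep (pvFtf acc) p.1 := by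
  match acc with
  | [] => simp [pv_insertBy_nil, pvFtf, pvBStep]
  | [a] =>
      simp only [pv_insertBy_cons, pv_insertBy_nil]
      by_cases h : p.1 < a.1 <;> simp [h, pvFtf, pvBStep]
  | a :: b :: t =>
      simp only [pv_insertBy_cons]
      by_cases h1 : p.1 < a.1
      · simp [h1, pvFtf, pvBStep]
      · by_cases h2 : p.1 < b.1 <;> simp [h1, h2, pvFtf, pvBStep]

theorem pv_ftf_foldl (l : List (Int × Int)) (acc : List (Int × Int)) :
    pvFtf (l.foldl (fun acc x => PySem.List.insertBy (fun a b : Int × Int => decide (a.1 < b.1)) x acc) acc) =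
      l.foldl (fun m x => pvBStep m x.1) (pvFtf acc) := by
  induction l generalizing acc with
  | nil => rfl
  | cons x t ih => simp only [List.foldl_cons, ih, pv_ftf_insert]

theorem pv_foldl_append_singleton {α β : Type} (f : α → β) (l : List α) (acc : List β) :
    l.foldl (fun acc e => acc ++ [f e]) acc = acc ++ l.map f := by
  induction l generalizing acc with
  | nil => simp
  | cons x t ih => simp [ih]

-- B's loop state equals the first two x's of A's sorted list
theorem pv_ftf_sorted (eyes : List (Int × Int × Int × Int)) :
    pvFtf (PySem.List.sorted
        (eyes.foldl (fun acc e =>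
          acc ++ [(e.1 + PySem.Int.floordiv e.2.2.1 2, e.2.1 + PySem.Int.floordiv e.2.2.2 2)]) [])
        (fun p => p.1)) =
      eyes.foldl (fun m e => pvBStep m (e.1 + PySem.Int.floordiv e.2.2.1 2)) (none, none) := by
  rw [pv_foldl_append_singleton, List.nil_append, PySem.List.sorted_eq_foldl_insertBy,
      pv_ftf_foldl, List.foldl_map]
  rfl

-- ===== VERDICT (by name: the statement is the Claim_ definition above) =====
theorem analyze_gaze_direction_1_spec : Claim_equal_analyze_gaze_direction_1 := by
  intro eyes roi_gray face_width _ hpre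
  unfold Spec_analyze_gaze_direction_1
  unfold analyze_gaze_direction_1 analyze_gaze_direction_1_alt
  dsimp only
  have hftf := pv_ftf_sorted eyes
  have hlen : 2 ≤ (PySem.List.sorted
      (eyes.foldl (fun acc e =>
        acc ++ [(e.1 + PySem.Int.floordiv e.2.2.1 2, e.2.1 + PySem.Int.floordiv e.2.2.2 2)]) [])
      (fun p => p.1)).length := by
    rw [PySem.List.length_sorted, pv_foldl_append_singleton, List.nil_append, List.length_map]
    exact hpre
  rw [← hftf]
  generalize hgen : PySem.List.sorted
      (eyes.foldl (fun acc e =>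
        acc ++ [(e.1 + PySem.Int.floordiv e.2.2.1 2, e.2.1 + PySem.Int.floordiv e.2.2.2 2)]) [])
      (fun p => p.1) = s at hlen ⊢
  match s with
  | [] => simp at hlen
  | [a] => simp at hlen
  | a :: b :: t =>
      dsimp only [pvFtf]
      simp [PySem.List.pyGet?, PySem.List.pyIdx?,
        show (0:Int) ≤ (t.length:Int) + 1 from by positivity]
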